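-- pv_equiv track=rewrite | github.com/braindatalab/gecobench | data/dataset_generation/post_labeling.py | replace_pronouns_by_gender_neutral_pronouns
-- ===== SOURCE A (Python) =====
-- def replace_pronouns_by_gender_neutral_pronouns(sentence: list) -> list:
--     pronoun_map = {
--         "he": "they",
--         "she": "they",
--         "him": "them",
--         "her": "them",
--         "his": "their",
--         "hers": "theirs",
--         "He": "They",
--         "She": "They",
--         "Him": "Them",
--         "Her": "Them",
--         "His": "Their",
--         "Hers": "Theirs"
--     }
--
--     for k, word in enumerate(sentence):
--         if word in pronoun_map:
--             sentence[k] = pronoun_map[word]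
--
--     return sentence
-- ===== SOURCE B (Python) =====
-- def replace_pronouns_by_gender_neutral_pronouns(sentence: list) -> list:
--     base = {"he": "they", "she": "they", "him": "them",
--             "her": "them", "his": "their", "hers": "theirs"}
--
--     def neutral(word):
--         low = word.lower()
--         rep = base.get(low)
--         if rep is None:
--             return word
--         if word == low:
--             return rep
--         if word == low.capitalize():
--             return rep.capitalize()
--         return word
--
--     sentence[:] = [neutral(w) for w in sentence]
--     return sentence
-- ===== Notes on version B (the rewrite author's own statement) =====
-- stated objective: simpler
-- what changed: Replaces the 12-entry exact-case lookup table with a 6-entry lowercase base map plus casing reconstruction (word matched against its lower/capitalized form), applied via a helper and slice assignment instead of index-by-index writes.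
import Mathlib
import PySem

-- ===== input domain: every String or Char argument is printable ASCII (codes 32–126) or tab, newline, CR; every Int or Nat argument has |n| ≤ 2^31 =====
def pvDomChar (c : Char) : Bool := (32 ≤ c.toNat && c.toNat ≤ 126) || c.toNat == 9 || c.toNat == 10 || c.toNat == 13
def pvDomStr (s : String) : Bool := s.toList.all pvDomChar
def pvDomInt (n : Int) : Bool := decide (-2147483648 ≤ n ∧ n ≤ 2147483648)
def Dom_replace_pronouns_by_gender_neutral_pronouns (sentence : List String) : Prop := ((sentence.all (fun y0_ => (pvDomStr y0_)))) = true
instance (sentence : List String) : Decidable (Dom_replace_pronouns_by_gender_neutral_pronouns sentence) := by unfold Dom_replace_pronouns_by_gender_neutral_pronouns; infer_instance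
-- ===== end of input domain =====

-- B replaces A's 12-entry exact-case table by a 6-entry lowercase base map plus casing
-- reconstruction, applied as a map (objective: simpler). Both Pythons mutate `sentence`
-- in place identically (B via slice assignment) and return the same list object.

-- ===== PORT A =====
def pvPronounMap : PySem.Dict String String := PySem.Dict.mk
  [("he","they"),("she","they"),("him","them"),("her","them"),("his","their"),("hers","theirs"),
   ("He","They"),("She","They"),("Him","Them"),("Her","Them"),("His","Their"),("Hers","Theirs")]

-- the loop body: `if word in pronoun_map: sentence[k] = pronoun_map[word]`
def pvStepA (acc : List String) (kw : Int × String) : List String :=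
  match pvPronounMap.get? kw.2 with
  | some v => acc.set kw.1.toNat v
  | none => acc

def replace_pronouns_by_gender_neutral_pronouns (sentence : List String) : List String :=
  (PySem.List.enumerate sentence).foldl pvStepA sentence

-- ===== PORT B =====
def pvBase : PySem.Dict String String := PySem.Dict.mk
  [("he","they"),("she","they"),("him","them"),("her","them"),("his","their"),("hers","theirs")]

-- str.capitalize(), ported by hand: first char uppercased, rest lowered (exact on ASCII)
def pvCapitalize (s : String) : String :=
  match s.toList with
  | [] => ""
  | c :: cs => String.ofList (PySem.Chars.upperChar c :: PySem.Chars.lower cs)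

def pvNeutral (w : String) : String :=
  let low := PySem.Str.lower w
  match pvBase.get? low with
  | none => w
  | some rep =>
    if w == low then rep
    else if w == pvCapitalize low then pvCapitalize rep
    else w

def replace_pronouns_by_gender_neutral_pronouns_alt (sentence : List String) : List String :=
  sentence.map pvNeutral

-- ===== PRECONDITION & SPEC =====
def Spec_replace_pronouns_by_gender_neutral_pronouns (sentence : List String) (out : List String) : Prop := out = replace_pronouns_by_gender_neutral_pronouns_alt sentence
instance (sentence : List String) (out : List String) : Decidable (Spec_replace_pronouns_by_gender_neutral_pronouns sentence out) := by unfold Spec_replace_pronouns_by_gender_neutral_pronouns; infer_instance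

-- ===== CLAIM (what is proved, stated in full; the proofs are below) =====
def Claim_equal_replace_pronouns_by_gender_neutral_pronouns : Prop := ∀ (sentence : List String), Dom_replace_pronouns_by_gender_neutral_pronouns sentence → Spec_replace_pronouns_by_gender_neutral_pronouns sentence (replace_pronouns_by_gender_neutral_pronouns sentence)

-- ===== LEMMAS AND PROOFS =====

-- what A's loop writes at position k, as a function of the word alone
def pvLookupA (w : String) : String :=
  match pvPronounMap.get? w with
  | some v => v
  | none => w

-- pointwise agreement: A's table lookup = B's base map + casing reconstruction
lemma pvPoint (w : String) : pvLookupA w = pvNeutral w := by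
  by_cases h1 : w = "he";  · subst h1; decide
  by_cases h2 : w = "she"; · subst h2; decide
  by_cases h3 : w = "him"; · subst h3; decide
  by_cases h4 : w = "her"; · subst h4; decide
  by_cases h5 : w = "his"; · subst h5; decide
  by_cases h6 : w = "hers"; · subst h6; decide
  by_cases h7 : w = "He";  · subst h7; decide
  by_cases h8 : w = "She"; · subst h8; decide
  by_cases h9 : w = "Him"; · subst h9; decide
  by_cases h10 : w = "Her"; · subst h10; decide
  by_cases h11 : w = "His"; · subst h11; decide
  by_cases h12 : w = "Hers"; · subst h12; decide
  have gA : pvLookupA w = w := by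
    simp [pvLookupA, pvPronounMap, beq_iff_eq,
      Ne.symm h1, Ne.symm h2, Ne.symm h3, Ne.symm h4, Ne.symm h5, Ne.symm h6,
      Ne.symm h7, Ne.symm h8, Ne.symm h9, Ne.symm h10, Ne.symm h11, Ne.symm h12,
      PySem.Dict.get?]
  rw [gA]
  by_cases c1 : PySem.Str.lower w = "he"
  · have hc : pvCapitalize "he" = "He" := by decide
    simp [pvNeutral, pvBase, c1, PySem.Dict.get?, beq_iff_eq, h1, hc, h7]
  by_cases c2 : PySem.Str.lower w = "she"
  · have hc : pvCapitalize "she" = "She" := by decide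
    simp [pvNeutral, pvBase, c2, PySem.Dict.get?, beq_iff_eq, h2, hc, h8]
  by_cases c3 : PySem.Str.lower w = "him"
  · have hc : pvCapitalize "him" = "Him" := by decide
    simp [pvNeutral, pvBase, c3, PySem.Dict.get?, beq_iff_eq, h3, hc, h9]
  by_cases c4 : PySem.Str.lower w = "her"
  · have hc : pvCapitalize "her" = "Her" := by decide
    simp [pvNeutral, pvBase, c4, PySem.Dict.get?, beq_iff_eq, h4, hc, h10]
  by_cases c5 : PySem.Str.lower w = "his"
  · have hc : pvCapitalize "his" = "His" := by decide
    simp [pvNeutral, pvBase, c5, PySem.Dict.get?, beq_iff_eq, h5, hc, h11]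
  by_cases c6 : PySem.Str.lower w = "hers"
  · have hc : pvCapitalize "hers" = "Hers" := by decide
    simp [pvNeutral, pvBase, c6, PySem.Dict.get?, beq_iff_eq, h6, hc, h12]
  simp [pvNeutral, pvBase, PySem.Dict.get?, beq_iff_eq,
    Ne.symm c1, Ne.symm c2, Ne.symm c3, Ne.symm c4, Ne.symm c5, Ne.symm c6]

-- A's in-place loop, run on the suffix `xs` of `pre ++ xs`, rewrites the suffix to `xs.map pvLookupA`
lemma pvLoopA (xs pre : List String) :
    (PySem.List.enumerate xs (pre.length : Int)).foldl pvStepA (pre ++ xs)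
      = pre ++ xs.map pvLookupA := by
  induction xs generalizing pre with
  | nil => simp
  | cons x xs ih =>
    rw [PySem.List.enumerate_cons]
    have hset : pvStepA (pre ++ x :: xs) ((pre.length : Int), x)
        = (pre ++ [pvLookupA x]) ++ xs := by
      simp only [pvStepA, pvLookupA]
      cases pvPronounMap.get? x with
      | none => simp
      | some v =>
        simp only [Int.toNat_natCast]
        rw [List.set_append_right _ _ (le_refl pre.length)]
        simp
    have hlen : ((pre.length : Int) + 1) = (((pre ++ [pvLookupA x]).length : Int)) := by
      simp
    rw [List.foldl_cons, hset, hlen, ih (pre ++ [pvLookupA x])]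
    simp

-- ===== VERDICT (by name: the statement is the Claim_ definition above) =====
theorem replace_pronouns_by_gender_neutral_pronouns_spec : Claim_equal_replace_pronouns_by_gender_neutral_pronouns := by
  intro sentence _
  show replace_pronouns_by_gender_neutral_pronouns sentence = replace_pronouns_by_gender_neutral_pronouns_alt sentence
  have h := pvLoopA sentence []
  simp only [List.nil_append, List.length_nil, Nat.cast_zero] at h
  rw [replace_pronouns_by_gender_neutral_pronouns, replace_pronouns_by_gender_neutral_pronouns_alt, h]
  exact List.map_congr_left (fun w _ => pvPoint w)
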